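-- pv_equiv track=rewrite | github.com/ssarault/stack_based_vm | lang.py | strip_str
-- ===== SOURCE A (Python) =====
-- def strip_str(s):
--     token = s[0]
--     if token != s[-1] or (token != "'" and token != '"'):
--         return None
--
--     s = s[1:-1]
--
--     buff = [None for x in range(len(s))]
--     ignore = False
--     i = 0
--
--     for c in s:
--         if ignore:
--             if c == 'n':
--                 c = '\n'
--             elif c == '\t':
--                 c = '\t'
--             buff[i] = c
--             i += 1
--             ignore = False
--             continue
--
--         if c == '\\':
--             ignore = True
--             continue
--
--         if c == "'" or c == '"':
--             if c == token:
--                 return None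
--             continue
--
--         buff[i] = c
--         i += 1
--
--     return "".join(buff[:i])
-- ===== SOURCE B (Python) =====
-- def strip_str(s):
--     token = s[0]
--     if token != s[-1] or token not in "'\"":
--         return None
--     # stage 1: tokenize the inner text into (escaped?, char) pairs;
--     # a trailing backslash escapes nothing and yields no pair
--     tagged = []
--     it = iter(s[1:-1])
--     for c in it:
--         if c == '\\':
--             nxt = next(it, None)
--             if nxt is not None:
--                 tagged.append((True, nxt))
--         else:
--             tagged.append((False, c))
--     # stage 2: an unescaped quote of the delimiter type anywhere -> None
--     if any(not esc and c == token for esc, c in tagged):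
--         return None
--     # stage 3: drop unescaped quotes of the other type, translate \n
--     return ''.join(
--         ('\n' if esc and c == 'n' else c)
--         for esc, c in tagged
--         if esc or c not in "'\""
--     )
-- ===== Notes on version B (the rewrite author's own statement) =====
-- stated objective: alternative
-- what changed: replaced A's single-pass ignore-flag state machine with three staged passes: a tokenizer pairing each char with an escaped? tag, an any() validation pass for an unescaped delimiter quote, and a comprehension that drops other-type quotes and translates escaped n
import Mathlib
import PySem

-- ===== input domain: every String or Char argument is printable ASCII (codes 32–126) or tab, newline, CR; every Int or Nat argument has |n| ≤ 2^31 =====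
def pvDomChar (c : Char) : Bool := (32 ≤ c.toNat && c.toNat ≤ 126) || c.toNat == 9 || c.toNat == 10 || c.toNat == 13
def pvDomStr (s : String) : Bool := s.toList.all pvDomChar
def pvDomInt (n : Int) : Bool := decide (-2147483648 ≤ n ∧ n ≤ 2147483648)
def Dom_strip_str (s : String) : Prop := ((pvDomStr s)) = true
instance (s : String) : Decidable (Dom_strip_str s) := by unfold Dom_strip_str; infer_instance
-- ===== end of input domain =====

-- B replaces A's single-pass ignore-flag state machine with three staged passes
-- (escape tokenizer, validation, translation); return values proved equal on nonempty strings.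

-- ===== PORT A =====
-- A's for-loop with the ignore flag; buff[:i] is modelled by the accumulator of chars written so far.
def stripALoop (token : Char) : List Char → List Char → Bool → Option (List Char)
  | [], acc, _ => some acc
  | c :: rest, acc, ignore =>
    if ignore then
      let c' := if c = 'n' then '\n' else if c = '\t' then '\t' else c
      stripALoop token rest (acc ++ [c']) false
    else if c = '\\' then
      stripALoop token rest acc true
    else if c = '\'' ∨ c = '"' then
      if c = token then none else stripALoop token rest acc false
    else
      stripALoop token rest (acc ++ [c]) false

def strip_str (s : String) : Option String :=
  match s.toList with
  | [] => none  -- Python A raises IndexError here; excluded by Pre_strip_str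
  | c0 :: rest =>
    let token := c0
    let last := (c0 :: rest).getLast (by simp)
    if token ≠ last ∨ (token ≠ '\'' ∧ token ≠ '"') then none
    else
      -- s[1:-1]
      let inner := (rest).dropLast
      (stripALoop token inner [] false).map (fun l => String.ofList l)

-- ===== PORT B =====
-- B stage 1: tokenize into (escaped?, char) pairs; a trailing backslash yields no pair.
def tokenizeB : List Char → List (Bool × Char)
  | [] => []
  | c :: rest =>
    if c = '\\' then
      match rest with
      | [] => []
      | d :: rest' => (true, d) :: tokenizeB rest'
    else (false, c) :: tokenizeB rest

def strip_str_alt (s : String) : Option String :=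
  match s.toList with
  | [] => none  -- Python B raises IndexError here; excluded by Pre_strip_str
  | c0 :: rest =>
    let token := c0
    let last := (c0 :: rest).getLast (by simp)
    if token ≠ last ∨ (token ≠ '\'' ∧ token ≠ '"') then none
    else
      let tagged := tokenizeB rest.dropLast
      -- stage 2: an unescaped delimiter quote anywhere -> none
      if tagged.any (fun p => !p.1 && p.2 == token) then none
      -- stage 3: drop unescaped quotes of the other type, translate escaped 'n'
      else some (String.ofList
        ((tagged.filter (fun p => p.1 || !(p.2 == '\'' || p.2 == '"'))).map
          (fun p => if p.1 && p.2 == 'n' then '\n' else p.2)))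

-- ===== PRECONDITION & SPEC =====
-- Pre_ excludes only the empty string, on which A raises IndexError (s[0]).
def Pre_strip_str (s : String) : Prop := s ≠ ""
instance (s : String) : Decidable (Pre_strip_str s) := by unfold Pre_strip_str; infer_instance
def pvWitness_strip_str : String := "'ab'"
def Spec_strip_str (s : String) (out : Option String) : Prop := out = strip_str_alt s
instance (s : String) (out : Option String) : Decidable (Spec_strip_str s out) := by unfold Spec_strip_str; infer_instance

-- ===== CLAIM (what is proved, stated in full; the proofs are below) =====
def Claim_equal_strip_str : Prop := ∀ (s : String), Dom_strip_str s → Pre_strip_str s → Spec_strip_str s (strip_str s)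

-- ===== LEMMAS AND PROOFS =====

-- A's flag loop computes exactly B's three staged passes over the tokenization.
theorem tokB_bs (d : Char) (rest' : List Char) :
    tokenizeB ('\\' :: d :: rest') = (true, d) :: tokenizeB rest' := by
  simp [tokenizeB]

theorem tokB_bs_nil : tokenizeB ['\\'] = [] := by
  rfl

theorem tokB_ns (c : Char) (rest : List Char) (h : ¬ c = '\\') :
    tokenizeB (c :: rest) = (false, c) :: tokenizeB rest := by
  rw [tokenizeB.eq_def]; simp [h]

theorem stripALoop_eq_stages (token : Char) (htok : token = '\'' ∨ token = '"') :
    ∀ (l acc : List Char),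
      stripALoop token l acc false =
        if (tokenizeB l).any (fun p => !p.1 && p.2 == token) then none
        else some (acc ++
          ((tokenizeB l).filter (fun p => p.1 || !(p.2 == '\'' || p.2 == '"'))).map
            (fun p => if p.1 && p.2 == 'n' then '\n' else p.2)) := by
  intro l
  induction hl : l.length using Nat.strong_induction_on generalizing l with
  | _ n ih =>
    intro acc
    match l with
    | [] => simp [stripALoop, tokenizeB]
    | c :: rest =>
      by_cases hb : c = '\\'
      · subst hb
        have hnq : ¬('\\' = '\'' ∨ '\\' = '"') := by decide
        simp only [stripALoop, if_neg hnq, Bool.false_eq_true, if_false, if_true]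
        match rest with
        | [] => simp [stripALoop, tokB_bs_nil]
        | d :: rest' =>
          simp only [stripALoop, if_true]
          rw [ih rest'.length (by subst hl; simp) rest' rfl, tokB_bs]
          have hc' : (if d = 'n' then '\n' else if d = '\t' then '\t' else d)
              = (if d = 'n' then '\n' else d) := by
            by_cases h1 : d = 'n' <;> by_cases h2 : d = '\t' <;> simp [h1, h2]
          rw [hc']
          split <;> simp_all
      · by_cases hq : c = '\'' ∨ c = '"'
        · by_cases ht : c = token
          · subst ht
            rw [stripALoop]
            simp [hq, hb, tokB_ns c rest hb]
          · simp only [stripALoop, if_neg hb, if_pos hq, if_neg ht, Bool.false_eq_true, if_false]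
            rw [ih rest.length (by subst hl; simp) rest rfl, tokB_ns c rest hb,
              List.filter_cons_of_neg (by rcases hq with h | h <;> simp [h])]
            simp [List.any_cons, ht]
        · have ht : c ≠ token := by
            rcases htok with h | h <;> subst h <;> intro hc <;> exact hq (by simp [hc])
          simp only [stripALoop, if_neg hb, if_neg hq, if_neg ht, Bool.false_eq_true, if_false]
          rw [ih rest.length (by subst hl; simp) rest rfl, tokB_ns c rest hb]
          have hqb : (c == '\'' || c == '"') = false := by
            simp only [not_or] at hq; simp [hq.1, hq.2]
          split <;> simp_all

-- ===== VERDICT (by name: the statement is the Claim_ definition above) =====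
theorem strip_str_spec : Claim_equal_strip_str := by
  intro s _ _
  unfold Spec_strip_str strip_str strip_str_alt
  match h : s.toList with
  | [] => rfl
  | c0 :: rest =>
    simp only
    split
    · rfl
    · next hg =>
      rcases not_or.mp hg with ⟨-, h2⟩
      have htok : c0 = '\'' ∨ c0 = '"' := by
        rcases not_and_or.mp h2 with h3 | h3 <;> [left; right] <;> exact not_not.mp h3
      rw [stripALoop_eq_stages c0 htok]
      split <;> simp
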